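-- pv_equiv track=rewrite | github.com/MrBrantCode/unitest_baseline | mut_generate/mist_train_taco/taco_12051/solution.py | max_distinct_characters_sum
-- ===== SOURCE A (Python) =====
-- def max_distinct_characters_sum(s: str) -> int:
--     """
--     Given a string s, split it into two non-empty strings a and b such that f(a) + f(b) is maximized,
--     where f(x) is the number of distinct characters in string x.
--
--     Parameters:
--     s (str): The input string to be split.
--
--     Returns:
--     int: The maximum possible value of f(a) + f(b).
--     """
--     hm = {}
--     for ele in s:
--         if ele not in hm:
--             hm[ele] = 1
--         else:
--             hm[ele] += 1
--
--     hm_l = {}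
--     hm_r = {}
--     maxCount = 0
--     count = 0
--
--     for i, ele in enumerate(s):
--         if count >= maxCount:
--             maxCount = count
--
--         if ele not in hm_l:
--             hm_l[ele] = 1
--             hm[ele] -= 1
--             if hm[ele] == 0:
--                 hm.pop(ele)
--         else:
--             hm_l[ele] += 1
--             hm[ele] -= 1
--             if hm[ele] == 0:
--                 hm.pop(ele)
--
--         count = len(hm_l) + len(hm)
--
--     return maxCount
-- ===== SOURCE B (Python) =====
-- def max_distinct_characters_sum(s: str) -> int:
--     """Prefix/suffix distinct-count arrays combined at every split point."""
--     prefix = []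
--     seen = set()
--     for c in s:
--         seen.add(c)
--         prefix.append(len(seen))
--     suffix = []
--     seen = set()
--     for c in reversed(s):
--         seen.add(c)
--         suffix.append(len(seen))
--     suffix.reverse()
--     return max((p + q for p, q in zip(prefix[:-1], suffix[1:])), default=0)
-- ===== Notes on version B (the rewrite author's own statement) =====
-- stated objective: alternative
-- what changed: Replaces the single combined pass that mutates a shared remaining-count dict (decrement/pop-on-zero) while growing a left-side dict with two independent distinct-count scans (prefix left-to-right, suffix right-to-left over the reversed string) combined by zipping adjacent entries and taking the max with default 0.
import Mathlib
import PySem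

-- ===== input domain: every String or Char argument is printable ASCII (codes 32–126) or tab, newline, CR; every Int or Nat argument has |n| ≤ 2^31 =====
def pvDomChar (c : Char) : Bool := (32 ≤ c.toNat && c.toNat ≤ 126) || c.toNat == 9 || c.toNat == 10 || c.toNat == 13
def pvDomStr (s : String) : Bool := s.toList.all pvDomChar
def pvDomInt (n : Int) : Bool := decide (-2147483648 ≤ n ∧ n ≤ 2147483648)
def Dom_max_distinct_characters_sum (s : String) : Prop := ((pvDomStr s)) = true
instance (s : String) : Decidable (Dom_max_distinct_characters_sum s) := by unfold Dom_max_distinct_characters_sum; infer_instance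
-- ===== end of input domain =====

-- B replaces A's single combined pass over a shared mutated remaining-count dict with two
-- independent prefix/suffix distinct-count scans combined by zipping (objective: alternative).

-- ===== PORT A =====
-- loop body of A's second loop (the enumerate index i is never used, so the fold is over the chars);
-- 'hm[ele] -= 1' and the 'hm[ele] == 0' test are ported with modify/getD default 0, exact here since
-- ele is always a key of hm at that point (hm counts the not-yet-consumed occurrences).
def pvStepA (st : PySem.Dict Char Int × PySem.Dict Char Int × Int × Int) (ele : Char) :
    PySem.Dict Char Int × PySem.Dict Char Int × Int × Int :=
  let hm := st.1
  let hm_l := st.2.1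
  let maxCount := st.2.2.1
  let count := st.2.2.2
  let maxCount := if count ≥ maxCount then count else maxCount
  let (hm_l, hm) :=
    if hm_l.contains ele = false then
      (hm_l.insert ele 1,
        let hm := hm.modify ele 0 (· - 1)
        if hm.getD ele 0 == 0 then hm.erase ele else hm)
    else
      (hm_l.modify ele 0 (· + 1),
        let hm := hm.modify ele 0 (· - 1)
        if hm.getD ele 0 == 0 then hm.erase ele else hm)
  (hm, hm_l, maxCount, (hm_l.size : Int) + (hm.size : Int))

def max_distinct_characters_sum (s : String) : Int :=
  let hm := s.toList.foldl (fun hm ele =>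
      if hm.contains ele = false then hm.insert ele 1 else hm.modify ele 0 (· + 1))
    (PySem.Dict.empty : PySem.Dict Char Int)
  let st := s.toList.foldl pvStepA (hm, PySem.Dict.empty, 0, 0)
  st.2.2.1

-- ===== PORT B =====
-- shared shape of B's two scanning loops: grow a set, append its size
def pvScanStep (st : PySem.Set Char × List Int) (c : Char) : PySem.Set Char × List Int :=
  let seen := PySem.Set.add st.1 c
  (seen, st.2 ++ [PySem.Set.len seen])

def max_distinct_characters_sum_alt (s : String) : Int :=
  let pfx := (s.toList.foldl pvScanStep (PySem.Set.empty, [])).2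
  let sfx := ((s.toList.reverse.foldl pvScanStep (PySem.Set.empty, [])).2).reverse
  let cands := ((PySem.List.slice pfx none (some (-1))).zip
                  (PySem.List.slice sfx (some 1) none)).map (fun p => p.1 + p.2)
  PySem.List.maxD cands id 0

-- ===== PRECONDITION & SPEC =====
def Spec_max_distinct_characters_sum (s : String) (out : Int) : Prop := out = max_distinct_characters_sum_alt s
instance (s : String) (out : Int) : Decidable (Spec_max_distinct_characters_sum s out) := by unfold Spec_max_distinct_characters_sum; infer_instance

-- ===== CLAIM (what is proved, stated in full; the proofs are below) =====
def Claim_equal_max_distinct_characters_sum : Prop := ∀ (s : String), Dom_max_distinct_characters_sum s → Spec_max_distinct_characters_sum s (max_distinct_characters_sum s)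

-- ===== LEMMAS AND PROOFS =====

-- the value both programs compute candidates of: distinct chars of a prefix plus distinct chars of the suffix
def pvCand (l : List Char) (j : Nat) : Int :=
  ((l.take j).toFinset.card : Int) + ((l.drop j).toFinset.card : Int)

-- canonical contents of A's dict hm while the chars of r are still unconsumed (u = distinct chars of the whole string)
def pvF (u r : List Char) : List (Char × Int) :=
  u.filterMap (fun k => if r.count k = 0 then none else some (k, (r.count k : Int)))

theorem pvF_cons_zero (a : Char) (u r : List Char) (ha : r.count a = 0) :
    pvF (a :: u) r = pvF u r := by
  simp [pvF, List.filterMap_cons, ha]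

theorem pvF_cons_pos (a : Char) (u r : List Char) (ha : ¬ r.count a = 0) :
    pvF (a :: u) r = (a, (r.count a : Int)) :: pvF u r := by
  simp [pvF, List.filterMap_cons, ha]

theorem pv_setLen (xs : List Char) : (PySem.Set.ofList xs).length = xs.toFinset.card := by
  rw [← List.toFinset_card_of_nodup (PySem.Set.nodup_ofList xs)]
  congr 1
  ext x
  simp [List.mem_toFinset, PySem.Set.mem_ofList]

theorem pv_get?F (u r : List Char) (k : Char) :
    (PySem.Dict.mk (pvF u r)).get? k
      = if k ∈ u ∧ r.count k ≠ 0 then some ((r.count k : Int)) else none := by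
  induction u with
  | nil => simp [pvF, PySem.Dict.get?]
  | cons a u ih =>
    by_cases ha : r.count a = 0
    · rw [pvF_cons_zero a u r ha, ih]
      by_cases hk : k = a
      · subst hk; simp [ha]
      · simp [hk]
    · rw [pvF_cons_pos a u r ha, PySem.Dict.get?_mk_cons]
      by_cases hk : a = k
      · subst hk; simp [ha]
      · have hk' : k ≠ a := fun h => hk h.symm
        simp only [beq_iff_eq, hk, if_false]
        rw [ih]
        simp [hk']

theorem pv_lenF_filter (u r : List Char) :
    (pvF u r).length = (u.filter (fun k => decide (k ∈ r))).length := by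
  induction u with
  | nil => simp [pvF]
  | cons a u ih =>
    by_cases ha : r.count a = 0
    · have hm : a ∉ r := by rwa [← List.count_eq_zero]
      rw [pvF_cons_zero a u r ha, ih, List.filter_cons]
      simp [hm]
    · have hm : a ∈ r := by
        by_contra h; exact ha (List.count_eq_zero.mpr h)
      rw [pvF_cons_pos a u r ha, List.filter_cons]
      simp [hm, ih]

theorem pv_lenF (u r : List Char) (hu : u.Nodup) (hsub : ∀ x ∈ r, x ∈ u) :
    (pvF u r).length = r.toFinset.card := by
  rw [pv_lenF_filter]
  rw [← List.toFinset_card_of_nodup (hu.filter _)]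
  congr 1
  ext x
  simp only [List.mem_toFinset, List.mem_filter, decide_eq_true_eq]
  exact ⟨fun ⟨_, hx⟩ => hx, fun hx => ⟨hsub x hx, hx⟩⟩

theorem pv_FStep (u : List Char) (c : Char) (r' : List Char) :
    (if (r'.count c : Int) = 0 then
        ((pvF u (c :: r')).map (fun p => if p.1 == c then (c, (r'.count c : Int)) else p)).filter
          (fun p => !(p.1 == c))
      else (pvF u (c :: r')).map (fun p => if p.1 == c then (c, (r'.count c : Int)) else p))
      = pvF u r' := by
  induction u with
  | nil => by_cases h : (r'.count c : Int) = 0 <;> simp [pvF, h]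
  | cons a u ih =>
    by_cases hak : a = c
    · rw [hak]
      have h1 : ¬ (c :: r').count c = 0 := by simp [List.count_cons_self]
      rw [pvF_cons_pos c u (c :: r') h1, List.count_cons_self]
      by_cases h0 : r'.count c = 0
      · rw [if_pos (by exact_mod_cast h0)] at *
        rw [pvF_cons_zero c u r' h0]
        simp only [List.map_cons, List.filter_cons, beq_self_eq_true, Bool.not_true, if_pos rfl]
        simpa [h0] using ih
      · rw [if_neg (by exact_mod_cast h0)] at *
        rw [pvF_cons_pos c u r' h0]
        simp only [List.map_cons, beq_self_eq_true]
        simpa using ih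
    · have hka : ¬ c = a := fun h => hak h.symm
      have hcnt : (c :: r').count a = r'.count a := by simp [hka]
      by_cases ha : r'.count a = 0
      · rw [pvF_cons_zero a u (c :: r') (by rw [hcnt]; exact ha), pvF_cons_zero a u r' ha]
        exact ih
      · rw [pvF_cons_pos a u (c :: r') (by rw [hcnt]; exact ha), pvF_cons_pos a u r' ha, hcnt]
        by_cases h0 : r'.count c = 0
        · rw [if_pos (by exact_mod_cast h0)] at *
          simp only [List.map_cons, List.filter_cons]
          have : ((a, (r'.count a : Int)).1 == c) = false := by simp [hak]
          rw [ih]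
          simp [this]
        · rw [if_neg (by exact_mod_cast h0)] at *
          simp only [List.map_cons]
          have hfa : ((a, (r'.count a : Int)).1 == c) = false := by simp [hak]
          rw [hfa]
          simp only [if_neg (by simp : ¬ (false = true))]
          rw [ih]

theorem pv_scan (l : List Char) :
    l.foldl pvScanStep (PySem.Set.empty, []) =
      (PySem.Set.ofList l,
       (List.range l.length).map (fun j => (((l.take (j+1)).toFinset.card : Nat) : Int))) := by
  induction l using List.reverseRecOn with
  | nil => rfl
  | append_singleton l c ih =>
    rw [List.foldl_append, ih]
    have hof : PySem.Set.add (PySem.Set.ofList l) c = PySem.Set.ofList (l ++ [c]) := by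
      rw [PySem.Set.ofList_eq_foldl, PySem.Set.ofList_eq_foldl, List.foldl_append]
      rfl
    simp only [pvScanStep, List.foldl_cons, List.foldl_nil, hof]
    simp only [Prod.mk.injEq]
    refine ⟨trivial, ?_⟩
    rw [List.length_append, List.length_cons, List.length_nil, List.range_succ, List.map_append]
    congr 1
    · apply List.map_congr_left
      intro j hj
      rw [List.mem_range] at hj
      rw [List.take_append_of_le_length (by omega)]
    · simp only [List.map_cons, List.map_nil]
      rw [show (PySem.Set.ofList (l ++ [c])).len = ((PySem.Set.ofList (l ++ [c])).length : Int) from rfl]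
      rw [pv_setLen, List.take_of_length_le (by simp)]

theorem pv_sizeCounter (x : List Char) : (PySem.Dict.counter x : PySem.Dict Char Int).size = x.toFinset.card := by
  show (PySem.Dict.counter x).items.length = _
  rw [PySem.Dict.items_counter, List.length_map, pv_setLen]

theorem pv_map_eq_F (x : List Char) : ∀ (u : List Char), (∀ k ∈ u, x.count k ≠ 0) →
    u.map (fun k => (k, (x.count k : Int))) = pvF u x := by
  intro u
  induction u with
  | nil => intro _; simp [pvF]
  | cons a u ih =>
    intro h
    rw [List.map_cons, pvF_cons_pos a u x (h a (List.mem_cons_self ..)), ih (fun k hk => h k (List.mem_cons_of_mem _ hk))]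

theorem pv_counter_eq_F (x : List Char) :
    PySem.Dict.counter x = PySem.Dict.mk (pvF (PySem.Set.ofList x) x) := by
  apply PySem.Dict.ext
  show (PySem.Dict.counter x).items = _
  rw [PySem.Dict.items_counter]
  exact pv_map_eq_F x _ (fun k hk => by
    have : k ∈ x := (PySem.Set.mem_ofList x k).mp hk
    have := List.count_pos_iff.mpr this
    omega)

theorem pv_stepA (l p r' : List Char) (c : Char) (m cnt : Int) (hl : l = p ++ c :: r') :
    pvStepA (PySem.Dict.mk (pvF (PySem.Set.ofList l) (c :: r')), PySem.Dict.counter p, m, cnt) c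
      = (PySem.Dict.mk (pvF (PySem.Set.ofList l) r'), PySem.Dict.counter (p ++ [c]), max m cnt,
         pvCand l (p.length + 1)) := by
  have hcl : c ∈ l := by rw [hl]; exact List.mem_append_right _ (List.mem_cons_self ..)
  have hcu : c ∈ PySem.Set.ofList l := (PySem.Set.mem_ofList l c).mpr hcl
  have hget : (PySem.Dict.mk (pvF (PySem.Set.ofList l) (c :: r'))).get? c
      = some (((c :: r').count c : Int)) := by
    rw [pv_get?F]
    simp [hcu, List.count_cons_self]
  have hcont : (PySem.Dict.mk (pvF (PySem.Set.ofList l) (c :: r'))).contains c = true := by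
    rw [PySem.Dict.contains_eq_isSome_get?, hget]; rfl
  have hgetD : (PySem.Dict.mk (pvF (PySem.Set.ofList l) (c :: r'))).getD c 0
      = ((c :: r').count c : Int) := by
    rw [PySem.Dict.getD_eq_get?_getD, hget]; rfl
  have hval : ((c :: r').count c : Int) - 1 = (r'.count c : Int) := by
    rw [List.count_cons_self]; push_cast; ring
  have h1 : (PySem.Dict.mk (pvF (PySem.Set.ofList l) (c :: r'))).modify c 0 (· - 1)
      = (PySem.Dict.mk (pvF (PySem.Set.ofList l) (c :: r'))).insert c ((r'.count c : Int)) := by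
    show (PySem.Dict.mk _).insert c ((PySem.Dict.mk (pvF (PySem.Set.ofList l) (c :: r'))).getD c 0 - 1) = _
    rw [hgetD, hval]
  have hitems : ((PySem.Dict.mk (pvF (PySem.Set.ofList l) (c :: r'))).insert c ((r'.count c : Int))).items
      = (pvF (PySem.Set.ofList l) (c :: r')).map (fun p => if p.1 == c then (c, (r'.count c : Int)) else p) :=
    PySem.Dict.items_insert_of_contains _ _ hcont
  have hgd : ((PySem.Dict.mk (pvF (PySem.Set.ofList l) (c :: r'))).insert c ((r'.count c : Int))).getD c 0
      = (r'.count c : Int) := PySem.Dict.getD_insert_self _ _ _ _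
  -- the hm update (identical in both branches of the port)
  have hmEq : (if ((PySem.Dict.mk (pvF (PySem.Set.ofList l) (c :: r'))).modify c 0 (· - 1)).getD c 0 == 0
        then ((PySem.Dict.mk (pvF (PySem.Set.ofList l) (c :: r'))).modify c 0 (· - 1)).erase c
        else (PySem.Dict.mk (pvF (PySem.Set.ofList l) (c :: r'))).modify c 0 (· - 1))
      = PySem.Dict.mk (pvF (PySem.Set.ofList l) r') := by
    simp only [h1]
    by_cases h0 : (r'.count c : Int) = 0
    · rw [if_pos (by rw [hgd]; exact beq_iff_eq.mpr h0)]
      apply PySem.Dict.ext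
      show List.filter _ _ = _
      rw [hitems]
      have hs := pv_FStep (PySem.Set.ofList l) c r'
      rw [if_pos h0] at hs
      exact hs
    · rw [if_neg (by rw [hgd]; simpa using h0)]
      apply PySem.Dict.ext
      show _ = _
      rw [hitems]
      have hs := pv_FStep (PySem.Set.ofList l) c r'
      rw [if_neg h0] at hs
      exact hs
  have hcount : PySem.Dict.counter (p ++ [c]) = (PySem.Dict.counter p : PySem.Dict Char Int).modify c 0 (· + 1) :=
    PySem.Dict.counter_append_singleton p c
  have hsz : ((PySem.Dict.counter (p ++ [c]) : PySem.Dict Char Int).size : Int)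
      + ((PySem.Dict.mk (pvF (PySem.Set.ofList l) r')).size : Int) = pvCand l (p.length + 1) := by
    rw [pv_sizeCounter]
    rw [show (PySem.Dict.mk (pvF (PySem.Set.ofList l) r')).size = (pvF (PySem.Set.ofList l) r').length from rfl]
    rw [pv_lenF _ _ (PySem.Set.nodup_ofList l) (fun x hx => (PySem.Set.mem_ofList l x).mpr (by rw [hl]; exact List.mem_append_right _ (List.mem_cons_of_mem _ hx)))]
    have hl2 : l = (p ++ [c]) ++ r' := by rw [hl]; simp
    rw [pvCand, hl2, List.take_left' (by simp), List.drop_left' (by simp)]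
  have hmax : (if cnt ≥ m then cnt else m) = max m cnt := by split_ifs <;> omega
  simp only [pvStepA]
  by_cases hb : (PySem.Dict.counter p : PySem.Dict Char Int).contains c = false
  · have hins : (PySem.Dict.counter p : PySem.Dict Char Int).insert c 1 = PySem.Dict.counter (p ++ [c]) := by
      rw [hcount]
      show _ = (PySem.Dict.counter p).insert c ((PySem.Dict.counter p).getD c 0 + 1)
      rw [PySem.Dict.getD_of_not_contains _ 0 hb]
      norm_num
    simp only [if_pos hb, hmEq, hins, hmax]
    rw [hsz]
  · simp only [if_neg hb, hmEq, ← hcount, hmax]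
    rw [hsz]

theorem pv_loopA (l : List Char) : ∀ (r p : List Char) (m cnt : Int), l = p ++ r → r ≠ [] →
    (r.foldl pvStepA (PySem.Dict.mk (pvF (PySem.Set.ofList l) r), PySem.Dict.counter p, m, cnt)).2.2.1
      = ((List.range (r.length - 1)).map (fun t => pvCand l (p.length + 1 + t))).foldl max (max m cnt) := by
  intro r
  induction r with
  | nil => intro p m cnt _ hne; exact absurd rfl hne
  | cons c r' ih =>
    intro p m cnt hl _
    rw [List.foldl_cons, pv_stepA l p r' c m cnt hl]
    by_cases hr : r' = []
    · subst hr
      simp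
    · rw [ih (p ++ [c]) (max m cnt) (pvCand l (p.length + 1)) (by rw [hl]; simp) hr]
      have hlen : (c :: r').length - 1 = (r'.length - 1) + 1 := by
        cases r' with
        | nil => exact absurd rfl hr
        | cons x xs => simp
      rw [hlen, List.range_succ_eq_map, List.map_cons, List.foldl_cons, List.map_map]
      have hf : ∀ t ∈ List.range (r'.length - 1),
          pvCand l ((p ++ [c]).length + 1 + t)
            = ((fun t => pvCand l (p.length + 1 + t)) ∘ Nat.succ) t := by
        intro t _
        simp only [Function.comp_apply]
        congr 1
        simp only [List.length_append, List.length_cons, List.length_nil]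
        omega
      rw [List.map_congr_left hf]

theorem pv_A (s : String) :
    max_distinct_characters_sum s
      = ((List.range (s.toList.length - 1)).map (fun t => pvCand s.toList (1 + t))).foldl max 0 := by
  show (s.toList.foldl pvStepA (s.toList.foldl _ PySem.Dict.empty, PySem.Dict.empty, 0, 0)).2.2.1 = _
  have hfun : (fun (hm : PySem.Dict Char Int) (ele : Char) =>
      if hm.contains ele = false then hm.insert ele 1 else hm.modify ele 0 (· + 1))
      = (fun (d : PySem.Dict Char Int) (x : Char) => d.modify x 0 (· + 1)) := by
    funext d x
    by_cases h : d.contains x = false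
    · rw [if_pos h]
      show _ = d.insert x (d.getD x 0 + 1)
      rw [PySem.Dict.getD_of_not_contains _ 0 h]
      norm_num
    · rw [if_neg h]
  rw [hfun]
  rw [show s.toList.foldl (fun (d : PySem.Dict Char Int) (x : Char) => d.modify x 0 (· + 1)) PySem.Dict.empty
      = PySem.Dict.counter s.toList from rfl]
  rw [pv_counter_eq_F]
  cases hsl : s.toList with
  | nil => simp
  | cons c r' =>
    have := pv_loopA (c :: r') (c :: r') [] 0 0 (by simp) (by simp)
    rw [show (PySem.Dict.counter ([] : List Char) : PySem.Dict Char Int) = PySem.Dict.empty from rfl] at this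
    rw [this]
    simp

theorem pv_revmap (n : Nat) (g : Nat → Int) :
    ((List.range n).map g).reverse = (List.range n).map (fun i => g (n - 1 - i)) := by
  apply List.ext_getElem (by simp)
  intro i h1 h2
  simp only [List.length_reverse, List.length_map, List.length_range] at h1 h2 ⊢
  rw [List.getElem_reverse]
  simp

theorem pv_max?_cons (xs : List Int) : ∀ (x : Int),
    PySem.List.max? (x :: xs) id = some (xs.foldl max x) := by
  induction xs with
  | nil => intro x; rfl
  | cons y ys ih =>
    intro x
    show ys.foldl _ (if id x < id y then some y else some x) = _
    by_cases h : id x < id y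
    · rw [if_pos h]
      have hxy : max x y = y := max_eq_right (le_of_lt (by simpa using h))
      rw [show (y :: ys).foldl max x = ys.foldl max (max x y) from List.foldl_cons .., hxy]
      exact ih y
    · rw [if_neg h]
      have hxy : max x y = x := max_eq_left (le_of_not_gt (by simpa using h))
      rw [show (y :: ys).foldl max x = ys.foldl max (max x y) from List.foldl_cons .., hxy]
      exact ih x

theorem pv_maxD_foldl (xs : List Int) (h : ∀ x ∈ xs, 0 ≤ x) :
    PySem.List.maxD xs id 0 = xs.foldl max 0 := by
  cases xs with
  | nil => rfl
  | cons x xs =>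
    show (PySem.List.max? (x :: xs) id).getD 0 = _
    rw [pv_max?_cons, Option.getD_some, List.foldl_cons]
    congr 1
    exact (max_eq_right (h x (List.mem_cons_self ..))).symm

theorem pv_zip_shift (n : Nat) (f g : Nat → Int) :
    ((List.range (n+1)).map f).dropLast.zip (((List.range (n+1)).map g).drop 1)
      = (List.range n).map (fun t => (f t, g (t+1))) := by
  have h1 : ((List.range (n+1)).map f).dropLast = (List.range n).map f := by
    rw [List.range_succ, List.map_append, List.map_cons, List.map_nil, List.dropLast_concat]
  have h2 : ((List.range (n+1)).map g).drop 1 = (List.range n).map (fun t => g (t+1)) := by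
    rw [List.range_succ_eq_map, List.map_cons, List.drop_succ_cons, List.drop_zero, List.map_map]
    rfl
  rw [h1, h2, List.zip_map']

theorem pv_B (s : String) :
    max_distinct_characters_sum_alt s
      = PySem.List.maxD ((List.range (s.toList.length - 1)).map (fun t => pvCand s.toList (t + 1))) id 0 := by
  show PySem.List.maxD _ id 0 = _
  congr 1
  rw [pv_scan, pv_scan]
  dsimp only
  have hslice1 : ∀ (xs : List Int), PySem.List.slice xs none (some (-1)) = xs.dropLast := by
    intro xs; simp [pysem]
  have hslice2 : ∀ (xs : List Int), PySem.List.slice xs (some 1) none = xs.drop 1 := by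
    intro xs; simp [pysem]
  rw [hslice1, hslice2]
  rw [List.length_reverse, pv_revmap]
  have hsfx : (List.range s.toList.length).map
        (fun i => (((s.toList.reverse.take ((s.toList.length - 1 - i) + 1)).toFinset.card : Nat) : Int))
      = (List.range s.toList.length).map
        (fun i => (((s.toList.drop i).toFinset.card : Nat) : Int)) := by
    apply List.map_congr_left
    intro i hi
    rw [List.mem_range] at hi
    have h1 : (s.toList.length - 1 - i) + 1 = s.toList.length - i := by omega
    rw [h1, List.take_reverse]
    have h2 : s.toList.length - (s.toList.length - i) = i := by omega
    rw [h2, List.toFinset_reverse]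
  rw [hsfx]
  cases hn : s.toList.length with
  | zero => simp [List.range_zero]
  | succ n =>
    rw [pv_zip_shift, List.map_map, Nat.add_sub_cancel]
    apply List.map_congr_left
    intro t _
    simp [Function.comp, pvCand]

-- ===== VERDICT (by name: the statement is the Claim_ definition above) =====
theorem max_distinct_characters_sum_spec : Claim_equal_max_distinct_characters_sum := by
  intro s _
  show max_distinct_characters_sum s = max_distinct_characters_sum_alt s
  rw [pv_A, pv_B]
  rw [pv_maxD_foldl _ (by
    intro x hx
    rw [List.mem_map] at hx
    obtain ⟨t, _, rfl⟩ := hx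
    simp only [pvCand]
    positivity)]
  congr 1
  apply List.map_congr_left
  intro t _
  rw [Nat.add_comm]
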